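-- pv_equiv track=rewrite | github.com/CraazzzyyFoxx/anak-tournaments | backend/balancer-service/src/services/admin/balancer_utils.py | build_header_keys
-- ===== SOURCE A (Python) =====
-- def build_header_keys(headers: list[str]) -> list[str]:
--     """Build unique column keys from headers, appending __N suffix for duplicates."""
--     seen: dict[str, int] = {}
--     keys: list[str] = []
--     for index, header in enumerate(headers):
--         key_base = header.strip() or f"column_{index}"
--         occurrence = seen.get(key_base, 0)
--         seen[key_base] = occurrence + 1
--         keys.append(key_base if occurrence == 0 else f"{key_base}__{occurrence}")
--     return keys
-- ===== SOURCE B (Python) =====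
-- def build_header_keys(headers: list[str]) -> list[str]:
--     """Build unique column keys from headers, appending __N suffix for duplicates."""
--     groups: dict[str, list[int]] = {}
--     for index, header in enumerate(headers):
--         key_base = header.strip() or f"column_{index}"
--         groups.setdefault(key_base, []).append(index)
--     out: list[str] = [None] * len(headers)
--     for key_base, positions in groups.items():
--         for occurrence, position in enumerate(positions):
--             out[position] = key_base if occurrence == 0 else f"{key_base}__{occurrence}"
--     return out
-- ===== Notes on version B (the rewrite author's own statement) =====
-- stated objective: alternative
-- what changed: B first groups the indices of each base key into a dict mapping base -> list of positions, then fills a preallocated output list group by group (index-then-fill over groups.items), instead of A's single pass that threads a running occurrence-counter dict and appends keys in order.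
import Mathlib
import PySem

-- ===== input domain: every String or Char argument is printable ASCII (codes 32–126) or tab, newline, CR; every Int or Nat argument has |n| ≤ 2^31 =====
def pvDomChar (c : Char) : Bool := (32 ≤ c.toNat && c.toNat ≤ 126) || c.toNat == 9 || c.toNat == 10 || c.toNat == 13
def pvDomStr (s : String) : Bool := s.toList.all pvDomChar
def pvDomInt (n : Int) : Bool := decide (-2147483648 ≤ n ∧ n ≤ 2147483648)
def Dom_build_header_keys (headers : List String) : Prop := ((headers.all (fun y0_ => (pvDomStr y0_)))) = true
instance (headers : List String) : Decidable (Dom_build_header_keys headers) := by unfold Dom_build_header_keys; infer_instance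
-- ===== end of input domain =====

-- B groups the indices of each base key into a dict of position lists, then fills a
-- preallocated output list group by group, instead of A's single pass with a running
-- occurrence counter; objective: alternative (same cost, different data structure).

-- ===== PORT A =====
-- literal transliteration of A: one pass over enumerate(headers), threading (seen, keys)
def build_header_keys (headers : List String) : List String :=
  ((PySem.List.enumerate headers).foldl
    (fun (st : PySem.Dict String Int × List String) (ih : Int × String) =>
      let key_base : String :=
        if PySem.Str.strip ih.2 ≠ "" then PySem.Str.strip ih.2
        else "column_" ++ PySem.Int.toStr ih.1
      let occurrence : Int := st.1.getD key_base 0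
      (st.1.insert key_base (occurrence + 1),
       st.2 ++ [if occurrence == 0 then key_base
                else key_base ++ "__" ++ PySem.Int.toStr occurrence]))
    (PySem.Dict.empty, [])).2

-- ===== PORT B =====
-- literal transliteration of Source B: pass 1 builds groups : base ↦ list of indices
-- (setdefault(k, []).append(i) = insert k (getD k [] ++ [i])); pass 2 fills out[position]
-- group by group over groups.items. Python's [None] * len(headers) placeholder is ported
-- as replicate with "" — every slot is overwritten before the list is returned. Positions
-- come from enumerate, hence are nonnegative in-range indices, so out[p] = … is
-- List.set p.toNat (exact).
def build_header_keys_alt (headers : List String) : List String :=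
  let groups : PySem.Dict String (List Int) :=
    (PySem.List.enumerate headers).foldl
      (fun d ih =>
        let key_base : String :=
          if PySem.Str.strip ih.2 ≠ "" then PySem.Str.strip ih.2
          else "column_" ++ PySem.Int.toStr ih.1
        d.insert key_base (d.getD key_base [] ++ [ih.1]))
      PySem.Dict.empty
  let out0 : List String := List.replicate headers.length ""
  groups.items.foldl
    (fun out bps =>
      (PySem.List.enumerate bps.2).foldl
        (fun o jp =>
          o.set jp.2.toNat
            (if jp.1 == 0 then bps.1 else bps.1 ++ "__" ++ PySem.Int.toStr jp.1))
        out)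
    out0

-- ===== PRECONDITION & SPEC =====
def Spec_build_header_keys (headers : List String) (out : List String) : Prop := out = build_header_keys_alt headers
instance (headers : List String) (out : List String) : Decidable (Spec_build_header_keys headers out) := by unfold Spec_build_header_keys; infer_instance

-- ===== CLAIM (what is proved, stated in full; the proofs are below) =====
def Claim_equal_build_header_keys : Prop := ∀ (headers : List String), Dom_build_header_keys headers → Spec_build_header_keys headers (build_header_keys headers)

-- ===== LEMMAS AND PROOFS =====

-- the shared "key_base" computation of both ports
def pvBase (ih : Int × String) : String :=
  if PySem.Str.strip ih.2 ≠ "" then PySem.Str.strip ih.2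
  else "column_" ++ PySem.Int.toStr ih.1

-- the rendered key for a base with c earlier occurrences
def pvRender (b : String) (c : Int) : String :=
  if c == 0 then b else b ++ "__" ++ PySem.Int.toStr c

-- A's loop body, factored through the base
def pvStep (st : PySem.Dict String Int × List String) (b : String) :
    PySem.Dict String Int × List String :=
  let occurrence : Int := st.1.getD b 0
  (st.1.insert b (occurrence + 1), st.2 ++ [pvRender b occurrence])

-- the common specification: key i is pvRender bases[i] (count of bases[i] before i)
def pvSpecOut (pre : List String) : List String → List String
  | [] => []
  | b :: t => pvRender b (pre.count b : Int) :: pvSpecOut (pre ++ [b]) t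

-- ---------- A equals the specification ----------

lemma A_eq_fold (headers : List String) :
    build_header_keys headers =
      (((PySem.List.enumerate headers).map pvBase).foldl pvStep (PySem.Dict.empty, [])).2 := by
  unfold build_header_keys pvStep pvRender pvBase
  rw [List.foldl_map]

lemma A_core : ∀ (bs pre acc : List String) (seen : PySem.Dict String Int),
    (∀ b, seen.getD b 0 = (pre.count b : Int)) →
    (bs.foldl pvStep (seen, acc)).2 = acc ++ pvSpecOut pre bs := by
  intro bs
  induction bs with
  | nil => intro pre acc seen _; simp [pvSpecOut]
  | cons b t ih =>
    intro pre acc seen hseen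
    have hocc : seen.getD b 0 = (pre.count b : Int) := hseen b
    have hstep : pvStep (seen, acc) b =
        (seen.insert b (seen.getD b 0 + 1), acc ++ [pvRender b (seen.getD b 0)]) := rfl
    have hinv : ∀ b', (seen.insert b (seen.getD b 0 + 1)).getD b' 0 = ((pre ++ [b]).count b' : Int) := by
      intro b'
      rw [PySem.Dict.getD_insert]
      by_cases hb : b' = b
      · subst hb
        rw [if_pos rfl, hocc]
        simp [List.count_append]
      · rw [if_neg hb, hseen b']
        simp [List.count_append, Ne.symm hb]
    rw [List.foldl_cons, hstep,
        ih (pre ++ [b]) (acc ++ [pvRender b (seen.getD b 0)]) _ hinv, hocc]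
    simp [pvSpecOut]

-- ---------- pointwise description of the specification ----------

lemma pvSpecOut_getElem? : ∀ (bs pre : List String) (i : Nat),
    (pvSpecOut pre bs)[i]? =
      (bs[i]?).map (fun b => pvRender b ((pre ++ bs.take i).count b)) := by
  intro bs
  induction bs with
  | nil => intro pre i; simp [pvSpecOut]
  | cons b t ih =>
    intro pre i
    cases i with
    | zero => simp [pvSpecOut]
    | succ j =>
      simp only [pvSpecOut, List.getElem?_cons_succ, ih (pre ++ [b]) j, List.take_succ_cons,
        List.append_assoc, List.singleton_append]

-- ---------- B-side: the groups dict ----------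

-- positions of base b among bases, starting index s
def pvPos (bs : List String) (s : Int) (b : String) : List Int :=
  ((PySem.List.enumerate bs s).filter (fun p => p.2 == b)).map (·.1)

-- B's first loop, factored through the base
def pvGStep (d : PySem.Dict String (List Int)) (p : Int × String) : PySem.Dict String (List Int) :=
  d.insert p.2 (d.getD p.2 [] ++ [p.1])

lemma enumerate_map_pair : ∀ (xs : List String) (s : Int) (f : Int × String → String),
    (PySem.List.enumerate xs s).map (fun p => (p.1, f p)) =
      PySem.List.enumerate ((PySem.List.enumerate xs s).map f) s := by
  intro xs
  induction xs with
  | nil => intro s f; simp [PySem.List.enumerate_nil]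
  | cons x t ih =>
    intro s f
    simp only [PySem.List.enumerate_cons, List.map_cons]
    rw [ih (s + 1) f]

lemma groups_getD : ∀ (l : List (Int × String)) (d : PySem.Dict String (List Int)) (b : String),
    (l.foldl pvGStep d).getD b [] = d.getD b [] ++ (l.filter (fun p => p.2 == b)).map (·.1) := by
  intro l
  induction l with
  | nil => intro d b; simp
  | cons p t ih =>
    intro d b
    rw [List.foldl_cons, ih]
    by_cases hb : p.2 = b
    · subst hb
      simp [pvGStep]
    · have hpb : (p.2 == b) = false := by simpa using hb
      simp [pvGStep, PySem.Dict.getD_insert, Ne.symm hb, hpb]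

lemma groups_contains : ∀ (l : List (Int × String)) (d : PySem.Dict String (List Int)) (b : String),
    (l.foldl pvGStep d).contains b = (d.contains b || l.any (fun p => p.2 == b)) := by
  intro l
  induction l with
  | nil => intro d b; simp
  | cons p t ih =>
    intro d b
    rw [List.foldl_cons, ih]
    simp [pvGStep, PySem.Dict.contains_insert, Bool.or_left_comm, Bool.or_assoc, BEq.comm]

lemma groups_nodup_keys : ∀ (l : List (Int × String)) (d : PySem.Dict String (List Int)),
    d.keys.Nodup → (l.foldl pvGStep d).keys.Nodup := by
  intro l
  induction l with
  | nil => intro d h; simpa using h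
  | cons p t ih =>
    intro d h
    rw [List.foldl_cons]
    exact ih _ (PySem.Dict.nodup_keys_insert _ _ _ h)

-- ---------- B-side: the fill pass ----------

-- the inner fill loop for one group (b, ps), starting occurrence counter c
def pvFill (o : List String) (b : String) (ps : List Int) (c : Int) : List String :=
  (PySem.List.enumerate ps c).foldl
    (fun o jp => o.set jp.2.toNat (pvRender b jp.1)) o

lemma length_pvFill : ∀ (ps : List Int) (o : List String) (b : String) (c : Int),
    (pvFill o b ps c).length = o.length := by
  intro ps
  induction ps with
  | nil => intro o b c; simp [pvFill, PySem.List.enumerate_nil]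
  | cons p t ih =>
    intro o b c
    simp only [pvFill, PySem.List.enumerate_cons, List.foldl_cons]
    exact (ih _ b (c + 1)).trans (List.length_set ..)

-- filling group b at positions pvPos bs k b writes pvRender b (c + prefix count) at the
-- positions where bs has b, and leaves every other slot unchanged
lemma pvFill_getElem? : ∀ (bs : List String) (k : Nat) (c : Nat) (o : List String) (b : String)
    (i : Nat), k + bs.length ≤ o.length →
    (pvFill o b (pvPos bs (k : Int) b) (c : Int))[i]? =
      if k ≤ i ∧ bs[i - k]? = some b
      then some (pvRender b ((c : Int) + ((bs.take (i - k)).count b : Int)))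
      else o[i]? := by
  intro bs
  induction bs with
  | nil =>
    intro k c o b i _
    simp [pvFill, pvPos, PySem.List.enumerate_nil]
  | cons x t ih =>
    intro k c o b i hlen
    have hlen' : (k + 1) + t.length ≤ o.length := by
      simp only [List.length_cons] at hlen; omega
    by_cases hx : x = b
    · subst hx
      have hps : pvPos (x :: t) (k : Int) x = (k : Int) :: pvPos t ((k : Int) + 1) x := by
        simp [pvPos, PySem.List.enumerate_cons]
      have hfold : pvFill o x (pvPos (x :: t) (k : Int) x) (c : Int) =
          pvFill (o.set k (pvRender x (c : Int))) x (pvPos t ((k : Int) + 1) x) ((c : Int) + 1) := by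
        simp [pvFill, hps, PySem.List.enumerate_cons, Int.toNat_natCast]
      have hcast1 : ((k : Int) + 1) = ((k + 1 : Nat) : Int) := by push_cast; ring
      have hcast2 : ((c : Int) + 1) = ((c + 1 : Nat) : Int) := by push_cast; ring
      rw [hfold, hcast1, hcast2,
        ih (k + 1) (c + 1) (o.set k (pvRender x (c : Int))) x i
          (by simpa [List.length_set] using hlen')]
      rcases Nat.lt_trichotomy i k with hik | hik | hik
      · rw [if_neg (fun h => absurd h.1 (by omega)), if_neg (fun h => absurd h.1 (by omega)),
          List.getElem?_set_ne (by omega)]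
      · subst hik
        rw [if_neg (fun h => absurd h.1 (by omega)), if_pos ⟨le_refl i, by simp⟩,
          List.getElem?_set_self (by omega)]
        simp
      · have hsub : i - k = (i - (k + 1)) + 1 := by omega
        rw [hsub]
        simp only [List.getElem?_cons_succ, List.take_succ_cons, List.count_cons_self]
        by_cases hmem : t[i - (k + 1)]? = some x
        · rw [if_pos ⟨by omega, hmem⟩, if_pos ⟨by omega, hmem⟩]
          congr 1
          unfold pvRender
          have : ((c + 1 : Nat) : Int) + ((t.take (i - (k + 1))).count x : Int) =
              (c : Int) + (((t.take (i - (k + 1))).count x + 1 : Nat) : Int) := by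
            push_cast; ring
          rw [this]
        · rw [if_neg (fun h => hmem h.2), if_neg (fun h => hmem h.2),
            List.getElem?_set_ne (by omega)]
    · have hxb : (x == b) = false := by simpa using hx
      have hps : pvPos (x :: t) (k : Int) b = pvPos t ((k : Int) + 1) b := by
        simp [pvPos, PySem.List.enumerate_cons, hxb]
      have hcast1 : ((k : Int) + 1) = ((k + 1 : Nat) : Int) := by push_cast; ring
      rw [hps, hcast1, ih (k + 1) c o b i hlen']
      rcases Nat.lt_trichotomy i k with hik | hik | hik
      · rw [if_neg (fun h => absurd h.1 (by omega)), if_neg (fun h => absurd h.1 (by omega))]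
      · subst hik
        have h0 : (x :: t)[i - i]? = some x := by simp
        rw [if_neg (fun h => absurd h.1 (by omega)),
          if_neg (fun h => hx (by simpa [h0] using h.2))]
      · have hsub : i - k = (i - (k + 1)) + 1 := by omega
        rw [hsub]
        simp only [List.getElem?_cons_succ, List.take_succ_cons, List.count_cons, hxb,
          Bool.false_eq_true, if_false, Nat.add_zero]
        by_cases hmem : t[i - (k + 1)]? = some b
        · rw [if_pos ⟨by omega, hmem⟩, if_pos ⟨by omega, hmem⟩]
        · rw [if_neg (fun h => hmem h.2), if_neg (fun h => hmem h.2)]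

-- the outer fold over the keys list: every slot whose base is a key gets its final value
lemma pvFillAll_getElem? : ∀ (K : List String) (bs o : List String) (i : Nat),
    bs.length ≤ o.length →
    (K.foldl (fun o b => pvFill o b (pvPos bs 0 b) 0) o)[i]? =
      if ∃ b ∈ K, bs[i]? = some b
      then (bs[i]?).map (fun b => pvRender b (((bs.take i).count b : Nat) : Int))
      else o[i]? := by
  intro K
  induction K with
  | nil => intro bs o i _; simp
  | cons b K' ih =>
    intro bs o i hlen
    rw [List.foldl_cons,
      ih bs (pvFill o b (pvPos bs 0 b) 0) i (by rw [length_pvFill]; exact hlen)]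
    have hz : (0 : Int) = ((0 : Nat) : Int) := rfl
    have hfill := pvFill_getElem? bs 0 0 o b i (by simpa using hlen)
    simp only [Nat.cast_zero, Nat.sub_zero, Nat.zero_le, true_and, zero_add] at hfill
    by_cases hmem : ∃ b' ∈ K', bs[i]? = some b'
    · rw [if_pos hmem, if_pos ⟨hmem.choose, List.mem_cons_of_mem b hmem.choose_spec.1,
        hmem.choose_spec.2⟩]
    · rw [if_neg hmem, hfill]
      by_cases hcur : bs[i]? = some b
      · rw [if_pos hcur, if_pos ⟨b, List.mem_cons_self, hcur⟩, hcur]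
        simp
      · rw [if_neg hcur, if_neg (by
          rintro ⟨b', hb', hsome⟩
          rcases List.mem_cons.mp hb' with h | h
          · exact hcur (h ▸ hsome)
          · exact hmem ⟨b', h, hsome⟩)]

-- ===== VERDICT (by name: the statement is the Claim_ definition above) =====
theorem build_header_keys_spec : Claim_equal_build_header_keys := by
  intro headers _
  unfold Spec_build_header_keys
  -- both sides in terms of bases
  set bs : List String := (PySem.List.enumerate headers).map pvBase with hbs
  have hlenbs : bs.length = headers.length := by
    simp [hbs, PySem.List.length_enumerate]
  -- A-side
  rw [A_eq_fold headers,
    A_core bs [] [] PySem.Dict.empty (by intro b; simp [PySem.Dict.getD_empty])]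
  -- B-side: name the groups dict
  show [] ++ pvSpecOut [] bs = build_header_keys_alt headers
  have hGfold : build_header_keys_alt headers =
      ((PySem.List.enumerate bs).foldl pvGStep PySem.Dict.empty).items.foldl
        (fun out bps => pvFill out bps.1 bps.2 0)
        (List.replicate headers.length "") := by
    unfold build_header_keys_alt
    have h1 : PySem.List.enumerate bs =
        (PySem.List.enumerate headers).map (fun p => (p.1, pvBase p)) := by
      rw [hbs, ← enumerate_map_pair headers 0 pvBase]
    rw [h1, List.foldl_map]
    rfl
  set G : PySem.Dict String (List Int) :=
    (PySem.List.enumerate bs).foldl pvGStep PySem.Dict.empty with hG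
  have hnodup : G.keys.Nodup := groups_nodup_keys _ _ (by simp)
  have hitems : G.items = G.keys.map (fun b => (b, pvPos bs 0 b)) := by
    rw [PySem.Dict.items_eq_map_keys G hnodup []]
    refine List.map_congr_left (fun b _ => ?_)
    rw [hG, groups_getD]
    simp [pvPos, PySem.Dict.getD_empty]
  have hB : build_header_keys_alt headers =
      G.keys.foldl (fun o b => pvFill o b (pvPos bs 0 b) 0) (List.replicate headers.length "") := by
    rw [hGfold, hitems, List.foldl_map]
  rw [hB, List.nil_append]
  -- membership of every base in the keys
  have hkey : ∀ i : Nat, (h : i < bs.length) → bs[i] ∈ G.keys := by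
    intro i h
    rw [← PySem.Dict.contains_iff_mem_keys, hG, groups_contains]
    have : bs[i] ∈ (PySem.List.enumerate bs 0).map (fun p => p.2) := by
      rw [PySem.List.map_snd_enumerate]
      exact List.getElem_mem h
    rcases List.mem_map.mp this with ⟨p, hp, hp2⟩
    simp only [PySem.Dict.contains_empty, Bool.false_or, List.any_eq_true]
    exact ⟨p, hp, by simp [hp2]⟩
  -- pointwise equality
  refine List.ext_getElem? (fun i => ?_)
  rw [pvFillAll_getElem? G.keys bs (List.replicate headers.length "") i (by rw [hlenbs]; simp),
    pvSpecOut_getElem? bs [] i]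
  by_cases hi : i < bs.length
  · have hsome : bs[i]? = some bs[i] := List.getElem?_eq_getElem hi
    rw [if_pos ⟨bs[i], hkey i hi, hsome⟩, hsome]
    simp
  · have hnone : bs[i]? = none := List.getElem?_eq_none (by omega)
    have hri : headers.length ≤ i := by omega
    rw [hnone, if_neg (by rintro ⟨b, _, h⟩; simp at h),
      List.getElem?_eq_none (by simpa using hri)]
    rfl
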